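-- pv_equiv track=rewrite | github.com/G9K-Sharrowkyn/enigma2 | Lengxuan_Language/06_Narzedzia/analyze_syllable_structure.py | analyze_syllable_structure
-- ===== SOURCE A (Python) =====
-- from collections import defaultdict
--
-- def count_syllables(word):
--     """Liczy liczbę sylab w słowie (liczba segmentów oddzielonych myślnikiem + 1)"""
--     # Usuń początkowy myślnik jeśli jest (dla partykuł jak -fu, -shi)
--     word = word.lstrip('-')
--
--     # Policz myślniki
--     if '-' in word:
--         return word.count('-') + 1
--     else:
--         return 1
--
-- def analyze_syllable_structure(entries):
--     """Analizuje strukturę sylabiczną słownika"""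
--     syllable_counts = defaultdict(int)
--     examples = defaultdict(list)
--
--     for word, meaning in entries:
--         syllables = count_syllables(word)
--         syllable_counts[syllables] += 1
--
--         # Zbierz przykłady (max 10 na kategorię)
--         if len(examples[syllables]) < 10:
--             examples[syllables].append((word, meaning))
--
--     return syllable_counts, examples
-- ===== SOURCE B (Python) =====
-- from collections import defaultdict
--
-- def count_syllables(word):
--     word = word.lstrip('-')
--     if '-' in word:
--         return word.count('-') + 1
--     else:
--         return 1
--
-- def analyze_syllable_structure(entries):
--     # One grouping pass, then derive counts and capped examples from the groups.
--     groups = defaultdict(list)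
--     for word, meaning in entries:
--         groups[count_syllables(word)].append((word, meaning))
--     syllable_counts = defaultdict(int)
--     examples = defaultdict(list)
--     for s, group in groups.items():
--         syllable_counts[s] = len(group)
--         examples[s] = group[:10]
--     return syllable_counts, examples
-- ===== Notes on version B (the rewrite author's own statement) =====
-- stated objective: alternative
-- what changed: B replaces A's single loop that maintains two dicts (a counter and a capped example list per key) with one uncapped grouping pass into a single dict, from which the counts (group length) and examples (first 10 of each group) are derived in a second pass over the groups.
import Mathlib
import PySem

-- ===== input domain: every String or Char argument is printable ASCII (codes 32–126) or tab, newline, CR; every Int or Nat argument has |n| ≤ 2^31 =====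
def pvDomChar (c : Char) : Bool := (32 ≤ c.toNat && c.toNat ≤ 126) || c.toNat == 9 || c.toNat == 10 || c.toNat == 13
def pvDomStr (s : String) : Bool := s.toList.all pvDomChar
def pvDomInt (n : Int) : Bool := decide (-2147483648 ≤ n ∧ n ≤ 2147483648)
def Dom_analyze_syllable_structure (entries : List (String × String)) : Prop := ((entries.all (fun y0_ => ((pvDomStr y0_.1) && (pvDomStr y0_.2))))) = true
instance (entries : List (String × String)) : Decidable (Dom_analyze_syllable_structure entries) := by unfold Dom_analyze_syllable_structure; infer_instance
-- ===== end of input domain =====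

-- B derives the counts and the 10-capped example lists from one uncapped grouping pass,
-- instead of A's single loop that maintains both dicts with an inline cap. Same cost.

-- ===== PORT A =====
-- count_syllables: word.lstrip('-') is ported by hand as dropWhile (· == '-') on the char list
-- (exact: Python's lstrip('-') removes exactly the leading '-' characters).
def count_syllables (word : String) : Int :=
  let w := word.toList.dropWhile (fun c => c == '-')
  if PySem.Chars.isIn ['-'] w then (PySem.Chars.count w ['-'] : Int) + 1 else 1

-- loop body of A: counter increment, then examples[syllables] (defaultdict access inserts
-- the key = setdefault), then the capped append
def pvStepA (st : PySem.Dict Int Int × PySem.Dict Int (List (String × String)))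
    (p : String × String) :
    PySem.Dict Int Int × PySem.Dict Int (List (String × String)) :=
  let s := count_syllables p.1
  let c := st.1.modify s 0 (· + 1)
  let e := st.2.setdefault s []
  let e := if (e.getD s []).length < 10 then e.modify s [] (· ++ [p]) else e
  (c, e)

def analyze_syllable_structure (entries : List (String × String)) :
    (List (Int × Int)) × (List (Int × List (String × String))) :=
  let st := entries.foldl pvStepA (PySem.Dict.empty, PySem.Dict.empty)
  (st.1.items, st.2.items)

-- ===== PORT B =====
-- loop body of B: group every entry (uncapped) under its syllable count
def pvStepB (d : PySem.Dict Int (List (String × String))) (p : String × String) :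
    PySem.Dict Int (List (String × String)) :=
  d.modify (count_syllables p.1) [] (· ++ [p])

def analyze_syllable_structure_alt (entries : List (String × String)) :
    (List (Int × Int)) × (List (Int × List (String × String))) :=
  let groups := entries.foldl pvStepB PySem.Dict.empty
  (groups.items.map (fun q => (q.1, (q.2.length : Int))),
   groups.items.map (fun q => (q.1, q.2.take 10)))

-- ===== PRECONDITION & SPEC =====
def Spec_analyze_syllable_structure (entries : List (String × String)) (out : (List (Int × Int)) × (List (Int × List (String × String)))) : Prop := out = analyze_syllable_structure_alt entries
instance (entries : List (String × String)) (out : (List (Int × Int)) × (List (Int × List (String × String)))) : Decidable (Spec_analyze_syllable_structure entries out) := by unfold Spec_analyze_syllable_structure; infer_instance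

-- ===== CLAIM (what is proved, stated in full; the proofs are below) =====
def Claim_equal_analyze_syllable_structure : Prop := ∀ (entries : List (String × String)), Dom_analyze_syllable_structure entries → Spec_analyze_syllable_structure entries (analyze_syllable_structure entries)

-- ===== LEMMAS AND PROOFS =====

-- invariant tying A's two dicts to B's single grouping dict
def pvInv (c : PySem.Dict Int Int) (e d : PySem.Dict Int (List (String × String))) : Prop :=
  c.keys = d.keys ∧ e.keys = d.keys ∧ d.keys.Nodup ∧
  (∀ s, c.getD s 0 = ((d.getD s []).length : Int)) ∧
  (∀ s, e.getD s [] = (d.getD s []).take 10)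

lemma pvInv_step (c : PySem.Dict Int Int) (e d : PySem.Dict Int (List (String × String)))
    (p : String × String) (h : pvInv c e d) :
    pvInv (pvStepA (c, e) p).1 (pvStepA (c, e) p).2 (pvStepB d p) := by
  obtain ⟨hck, hek, hnd, hc, he⟩ := h
  unfold pvInv pvStepA pvStepB
  dsimp only
  set s := count_syllables p.1 with hs
  have hcc : c.contains s = d.contains s := by
    rw [PySem.Dict.contains_eq_decide_mem_keys, PySem.Dict.contains_eq_decide_mem_keys, hck]
  have hec : e.contains s = d.contains s := by
    rw [PySem.Dict.contains_eq_decide_mem_keys, PySem.Dict.contains_eq_decide_mem_keys, hek]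
  have hdg : ∀ t, (d.modify s [] fun x => x ++ [p]).getD t [] =
      if t = s then d.getD s [] ++ [p] else d.getD t [] := by
    intro t; rw [PySem.Dict.getD_modify]
  by_cases hcon : d.contains s = true
  · -- key already present in all three dicts
    have hdkeys : (d.modify s [] fun x => x ++ [p]).keys = d.keys := by
      rw [PySem.Dict.keys_modify, PySem.Dict.keys_insert_of_contains _ _ hcon]
    have hckeys : (c.modify s 0 fun x => x + 1).keys = c.keys := by
      rw [PySem.Dict.keys_modify, PySem.Dict.keys_insert_of_contains _ _ (hcc.trans hcon)]
    have hcgetD : ∀ t, (c.modify s 0 fun x => x + 1).getD t 0 =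
        (((d.modify s [] fun x => x ++ [p]).getD t []).length : Int) := by
      intro t
      rw [PySem.Dict.getD_modify, hdg t]
      by_cases ht : t = s
      · simp only [ht, hc s]; push_cast [List.length_append, List.length_singleton]; ring
      · simp [ht, hc t]
    rw [PySem.Dict.setdefault_of_contains _ _ (hec.trans hcon)]
    by_cases hlen : (d.getD s []).length < 10
    · -- cap not reached: A appends too
      have htake : (d.getD s []).take 10 = d.getD s [] :=
        List.take_of_length_le (by omega)
      have hcond : (e.getD s []).length < 10 := by rw [he s, htake]; exact hlen
      rw [if_pos hcond]
      have hekeys : (e.modify s [] fun x => x ++ [p]).keys = e.keys := by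
        rw [PySem.Dict.keys_modify, PySem.Dict.keys_insert_of_contains _ _ (hec.trans hcon)]
      refine ⟨hckeys.trans (hck.trans hdkeys.symm), hekeys.trans (hek.trans hdkeys.symm),
        hdkeys ▸ hnd, hcgetD, ?_⟩
      intro t
      rw [PySem.Dict.getD_modify, hdg t]
      by_cases ht : t = s
      · simp only [ht, he s, htake]
        exact (List.take_of_length_le (by simp; omega)).symm
      · simp [ht, he t]
    · -- cap reached: A keeps its 10 examples, B still appends
      have hcond : ¬ (e.getD s []).length < 10 := by rw [he s, List.length_take]; omega
      rw [if_neg hcond]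
      refine ⟨hckeys.trans (hck.trans hdkeys.symm), hek.trans hdkeys.symm,
        hdkeys ▸ hnd, hcgetD, ?_⟩
      intro t
      rw [hdg t]
      by_cases ht : t = s
      · rw [ht, if_pos rfl, he s, List.take_append_of_le_length (by omega)]
      · simp [ht, he t]
  · -- fresh key: all three dicts append it
    have hcon' : d.contains s = false := by simpa using hcon
    have hg0 : d.getD s [] = [] := PySem.Dict.getD_of_not_contains _ _ hcon'
    have he0 : e.getD s [] = [] := PySem.Dict.getD_of_not_contains _ _ (hec.trans hcon')
    have hdkeys : (d.modify s [] fun x => x ++ [p]).keys = d.keys ++ [s] := by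
      rw [PySem.Dict.keys_modify, PySem.Dict.keys_insert_of_not_contains _ _ hcon']
    have hckeys : (c.modify s 0 fun x => x + 1).keys = d.keys ++ [s] := by
      rw [PySem.Dict.keys_modify,
        PySem.Dict.keys_insert_of_not_contains _ _ (hcc.trans hcon'), hck]
    rw [PySem.Dict.setdefault_of_not_contains _ _ (hec.trans hcon')]
    have hcond : ((e.insert s []).getD s []).length < 10 := by
      rw [PySem.Dict.getD_insert]; simp
    rw [if_pos hcond]
    have hekeys : ((e.insert s []).modify s [] fun x => x ++ [p]).keys = d.keys ++ [s] := by
      rw [PySem.Dict.keys_modify,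
        PySem.Dict.keys_insert_of_contains _ _ (PySem.Dict.contains_insert_self _ _ _),
        PySem.Dict.keys_insert_of_not_contains _ _ (hec.trans hcon'), hek]
    have hsnot : s ∉ d.keys := by
      rw [PySem.Dict.contains_eq_decide_mem_keys] at hcon'; simpa using hcon'
    refine ⟨hckeys.trans hdkeys.symm, hekeys.trans hdkeys.symm, ?_, ?_, ?_⟩
    · rw [hdkeys]; simp [List.nodup_append, hnd]
      intro a ha h2; exact hsnot (h2 ▸ ha)
    · intro t
      rw [PySem.Dict.getD_modify, hdg t]
      by_cases ht : t = s
      · simp [ht, hc s, hg0]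
      · simp [ht, hc t]
    · intro t
      rw [PySem.Dict.getD_modify, hdg t]
      by_cases ht : t = s
      · simp [ht, hg0]
      · simp [ht, PySem.Dict.getD_insert, he t]

lemma pvInv_foldl (l : List (String × String)) :
    ∀ (c : PySem.Dict Int Int) (e d : PySem.Dict Int (List (String × String))),
    pvInv c e d →
    pvInv (l.foldl pvStepA (c, e)).1 (l.foldl pvStepA (c, e)).2 (l.foldl pvStepB d) := by
  induction l with
  | nil => intro c e d h; exact h
  | cons p l ih =>
    intro c e d h
    simpa using ih (pvStepA (c, e) p).1 (pvStepA (c, e) p).2 (pvStepB d p) (pvInv_step c e d p h)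

-- ===== VERDICT (by name: the statement is the Claim_ definition above) =====
theorem analyze_syllable_structure_spec : Claim_equal_analyze_syllable_structure := by
  intro entries _
  unfold Spec_analyze_syllable_structure analyze_syllable_structure analyze_syllable_structure_alt
  have hinv : pvInv (PySem.Dict.empty : PySem.Dict Int Int)
      (PySem.Dict.empty : PySem.Dict Int (List (String × String)))
      (PySem.Dict.empty : PySem.Dict Int (List (String × String))) := by
    refine ⟨rfl, rfl, by simp [PySem.Dict.keys_empty], ?_, ?_⟩ <;>
      intro s <;> simp [PySem.Dict.getD_empty]
  obtain ⟨hck, hek, hnd, hc, he⟩ :=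
    pvInv_foldl entries PySem.Dict.empty PySem.Dict.empty PySem.Dict.empty hinv
  set st := entries.foldl pvStepA (PySem.Dict.empty, PySem.Dict.empty)
  set d := entries.foldl pvStepB (PySem.Dict.empty : PySem.Dict Int (List (String × String)))
  have hd : d.items = d.keys.map (fun k => (k, d.getD k [])) :=
    PySem.Dict.items_eq_map_keys d hnd []
  have h1 : st.1.items = d.items.map (fun q => (q.1, (q.2.length : Int))) := by
    rw [PySem.Dict.items_eq_map_keys st.1 (hck ▸ hnd) 0, hd, List.map_map, hck]
    exact List.map_congr_left fun a _ => by simp [hc a]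
  have h2 : st.2.items = d.items.map (fun q => (q.1, q.2.take 10)) := by
    rw [PySem.Dict.items_eq_map_keys st.2 (hek ▸ hnd) [], hd, List.map_map, hek]
    exact List.map_congr_left fun a _ => by simp [he a]
  simp only [h1, h2]
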